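-- pv_equiv track=rewrite | github.com/qige96/programming-practice | machine-learning/asso_rules.py | three_item_sets
-- ===== SOURCE A (Python) =====
-- def coverage(item_set, txs):
--     '''
--     count the number of instances covered by the rule
--
--     Parameters
--     ----------
--     item_set: list
--         item set with any number of items
--     txs: list
--         list of transactions that is a list of items
--
--     Returns
--     -------
--     count: int
--         coverage of a rule given a set of transaactions
--
--     Examples
--     --------
--         from Lecure 6 Slide 12
--         >>> txs = [['o','s'], ['m','o','w'], ['o','d'], ['o','d','s'], ['w','s']]
--         >>> set1 = ('o',); coverage(set1, txs)
--         4
--         >>> set2 = ('o','s'); coverage(set2, txs)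
--         2
--     '''
--     count = 0
--     for tx in txs:
--         if set(tx).issuperset(item_set):
--             count += 1
--     return count
--
-- def filter_item_sets_with_coverage(item_sets, txs, lower_bound):
--     '''
--     filter out item set with given minimum coverage
--
--     Parameters
--     ----------
--     item_sets: list
--         list of item sets
--     txs: list
--         list of transactions
--     lower_bound: int
--         minimun coverage that an item set should meet
--
--     Returns
--     -------
--     new_set : list
--         a new list of item sets in which all item sets meet minimun coverage
--     '''
--     new_set = []
--     for i in item_sets:
--         if coverage(i, txs) >= lower_bound:
--             new_set.append(i)
--     return new_set
--
-- def get_items(item_sets):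
--     '''extreact items from item sets or transactions'''
--     items = []
--     for item_set in item_sets:
--         for item in item_set:
--             if item not in items:
--                 items.append(item)
--     return items
--
-- def three_item_sets(two_sets, txs, min_coverage):
--     '''
--     construct three-item set from one-item set
--
--     Parameters
--     ----------
--     two_sets: list
--         two-item sets
--     txs: list
--         list of transactions that is a list of items
--     min_coverage: int
--         minumun coverage the item set should meet
--
--     Returns
--     -------
--     three_sets: list
--         list of three-item sets
--
--     Examples
--     --------
--         from Lecure 6 Slide 13
--         >>> txs = [['o','s'], ['m','o','w'], ['o','d'], ['o','d','s'], ['w','s']]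
--         >>> two_sets = [('o','s'), ('o','d')]
--         >>> three_item_sets(two_sets, txs, 2)
--         []
--         >>> three_item_sets(two_sets, txs, 1)
--         [('o', 's', 'd')]
--     '''
--     three_sets = []
--     items = get_items(two_sets)
--     from itertools import combinations_with_replacement
--     for tup in combinations_with_replacement(items, 3):
--         if len(set(tup)) == 3:
--             three_sets.append(tup)
--     return filter_item_sets_with_coverage(three_sets, txs, min_coverage)
-- ===== SOURCE B (Python) =====
-- from itertools import combinations
-- from collections import Counter
--
-- def get_items(item_sets):
--     '''extract distinct items from item sets, in first-occurrence order'''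
--     items = []
--     for item_set in item_sets:
--         for item in item_set:
--             if item not in items:
--                 items.append(item)
--     return items
--
-- def three_item_sets(two_sets, txs, min_coverage):
--     items = get_items(two_sets)
--     counts = Counter(tri
--                      for tx in txs
--                      for tri in combinations([it for it in items if it in set(tx)], 3))
--     return [tri for tri in combinations(items, 3) if counts[tri] >= min_coverage]
-- ===== Notes on version B (the rewrite author's own statement) =====
-- stated objective: faster
-- what changed: Replaces A's candidate-by-candidate coverage scans (combinations_with_replacement filtered by distinctness, then a rescan of all transactions per candidate) by one pass over the transactions populating a Counter of 3-item subsets, followed by a single filtering pass over combinations(items,3) using the count table.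
import Mathlib
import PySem

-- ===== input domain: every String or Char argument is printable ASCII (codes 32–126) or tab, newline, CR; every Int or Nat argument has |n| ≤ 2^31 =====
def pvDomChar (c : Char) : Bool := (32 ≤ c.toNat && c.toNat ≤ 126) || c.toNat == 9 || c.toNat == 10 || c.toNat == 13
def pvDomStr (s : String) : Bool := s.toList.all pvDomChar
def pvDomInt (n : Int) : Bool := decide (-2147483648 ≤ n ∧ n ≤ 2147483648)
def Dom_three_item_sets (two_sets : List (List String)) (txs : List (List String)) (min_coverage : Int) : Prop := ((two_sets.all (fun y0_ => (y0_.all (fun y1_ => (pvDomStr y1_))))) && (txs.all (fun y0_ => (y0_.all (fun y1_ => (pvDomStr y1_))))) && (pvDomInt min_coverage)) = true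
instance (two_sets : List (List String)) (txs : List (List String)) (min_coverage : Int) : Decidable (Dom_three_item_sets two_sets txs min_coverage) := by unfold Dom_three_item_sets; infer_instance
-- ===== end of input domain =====

-- B replaces A's per-candidate coverage rescans by one pass over the transactions building a
-- Counter of 3-item subsets, then a single filtering pass over combinations(items,3) (measured faster).


-- shared module helper get_items (used verbatim by both Pythons)
def pv_get_items (item_sets : List (List String)) : List String :=
  item_sets.foldl (fun items item_set =>
    item_set.foldl (fun items item => if item ∈ items then items else items ++ [item]) items) []

-- itertools.combinations_with_replacement(l, 2) / (l, 3): standard recursive transcription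
def pv_cwr2 (l : List String) : List (List String) :=
  match l with
  | [] => []
  | x :: xs => (x :: xs).map (fun y => [x, y]) ++ pv_cwr2 xs

def pv_cwr3 (l : List String) : List (List String) :=
  match l with
  | [] => []
  | x :: xs => (pv_cwr2 (x :: xs)).map (fun p => x :: p) ++ pv_cwr3 xs

-- ===== PORT A =====
def pv_coverage (item_set : List String) (txs : List (List String)) : Int :=
  txs.foldl (fun count tx =>
    if PySem.Set.issuperset (PySem.Set.ofList tx) item_set then count + 1 else count) 0

def pv_filter_item_sets_with_coverage (item_sets : List (List String)) (txs : List (List String)) (lower_bound : Int) : List (List String) :=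
  item_sets.foldl (fun new_set i =>
    if pv_coverage i txs ≥ lower_bound then new_set ++ [i] else new_set) []

def three_item_sets (two_sets : List (List String)) (txs : List (List String)) (min_coverage : Int) : List (List String) :=
  let items := pv_get_items two_sets
  let three_sets := (pv_cwr3 items).foldl (fun three_sets tup =>
    if PySem.Set.len (PySem.Set.ofList tup) == 3 then three_sets ++ [tup] else three_sets) []
  pv_filter_item_sets_with_coverage three_sets txs min_coverage

-- ===== PORT B =====
-- itertools.combinations(l, 2) / (l, 3): standard recursive transcription
def pv_comb2 (l : List String) : List (List String) :=
  match l with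
  | [] => []
  | x :: xs => xs.map (fun y => [x, y]) ++ pv_comb2 xs

def pv_comb3 (l : List String) : List (List String) :=
  match l with
  | [] => []
  | x :: xs => (pv_comb2 xs).map (fun p => x :: p) ++ pv_comb3 xs

def three_item_sets_alt (two_sets : List (List String)) (txs : List (List String)) (min_coverage : Int) : List (List String) :=
  let items := pv_get_items two_sets
  let counts : PySem.Dict (List String) Int :=
    PySem.Dict.counter (txs.flatMap (fun tx =>
      pv_comb3 (items.filter (fun it => PySem.Set.contains (PySem.Set.ofList tx) it))))
  (pv_comb3 items).filter (fun tri => counts.getD tri 0 ≥ min_coverage)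

-- ===== PRECONDITION & SPEC =====
def Spec_three_item_sets (two_sets : List (List String)) (txs : List (List String)) (min_coverage : Int) (out : List (List String)) : Prop := out = three_item_sets_alt two_sets txs min_coverage
instance (two_sets : List (List String)) (txs : List (List String)) (min_coverage : Int) (out : List (List String)) : Decidable (Spec_three_item_sets two_sets txs min_coverage out) := by unfold Spec_three_item_sets; infer_instance

-- ===== CLAIM (what is proved, stated in full; the proofs are below) =====
def Claim_equal_three_item_sets : Prop := ∀ (two_sets : List (List String)) (txs : List (List String)) (min_coverage : Int), Dom_three_item_sets two_sets txs min_coverage → Spec_three_item_sets two_sets txs min_coverage (three_item_sets two_sets txs min_coverage)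

-- ===== LEMMAS AND PROOFS =====

theorem pv_fold_add_nodup : ∀ (s : List String) (acc : List String), acc.Nodup →
    (s.foldl (fun its it => if it ∈ its then its else its ++ [it]) acc).Nodup := by
  intro s
  induction s with
  | nil => intro acc h; simpa using h
  | cons x xs ih =>
    intro acc h
    simp only [List.foldl_cons]
    split
    · exact ih acc h
    · exact ih _ (by simp [List.nodup_append, *]; exact fun a ha he => ‹x ∉ acc› (he ▸ ha))

theorem pv_get_items_foldl_nodup : ∀ (ls : List (List String)) (acc : List String), acc.Nodup →
    (ls.foldl (fun items item_set =>
      item_set.foldl (fun items item => if item ∈ items then items else items ++ [item]) items) acc).Nodup := by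
  intro ls
  induction ls with
  | nil => intro acc h; simpa using h
  | cons s ss ih => intro acc h; exact ih _ (pv_fold_add_nodup s acc h)

theorem pv_get_items_nodup (item_sets : List (List String)) : (pv_get_items item_sets).Nodup :=
  pv_get_items_foldl_nodup item_sets [] List.nodup_nil

theorem pv_cwr2_shape {l : List String} {p : List String} (h : p ∈ pv_cwr2 l) :
    ∃ a b, p = [a, b] ∧ a ∈ l ∧ b ∈ l := by
  induction l with
  | nil => simp [pv_cwr2] at h
  | cons x xs ih =>
    simp only [pv_cwr2, List.mem_append, List.mem_map] at h
    rcases h with ⟨y, hy, rfl⟩ | h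
    · exact ⟨x, y, rfl, by simp, hy⟩
    · obtain ⟨a, b, rfl, ha, hb⟩ := ih h
      exact ⟨a, b, rfl, by simp [ha], by simp [hb]⟩

theorem pv_setlen3 (a b c : String) :
    (PySem.Set.len (PySem.Set.ofList [a, b, c]) == 3) = decide ([a, b, c].Nodup) := by
  by_cases h1 : a = b <;> by_cases h2 : a = c <;> by_cases h3 : b = c <;> subst_vars <;>
    simp_all [PySem.Set.len, PySem.Set.ofList_eq_foldl, ne_comm]

theorem pv_cwr3_shape {l : List String} {t : List String} (h : t ∈ pv_cwr3 l) :
    ∃ a b c, t = [a, b, c] ∧ a ∈ l ∧ b ∈ l ∧ c ∈ l := by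
  induction l with
  | nil => simp [pv_cwr3] at h
  | cons x xs ih =>
    simp only [pv_cwr3, List.mem_append, List.mem_map] at h
    rcases h with ⟨p, hp, rfl⟩ | h
    · obtain ⟨a, b, rfl, ha, hb⟩ := pv_cwr2_shape hp
      exact ⟨x, a, b, rfl, by simp, ha, hb⟩
    · obtain ⟨a, b, c, rfl, ha, hb, hc⟩ := ih h
      exact ⟨a, b, c, rfl, by simp [ha], by simp [hb], by simp [hc]⟩

theorem pv_filter_cwr2 {l : List String} (h : l.Nodup) :
    (pv_cwr2 l).filter (fun p => decide p.Nodup) = pv_comb2 l := by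
  induction l with
  | nil => rfl
  | cons x xs ih =>
    have hx : x ∉ xs := (List.nodup_cons.mp h).1
    have hxs : xs.Nodup := (List.nodup_cons.mp h).2
    simp only [pv_cwr2, pv_comb2, List.filter_append, List.filter_map, ih hxs]
    congr 1
    simp only [List.filter_cons, Function.comp_def]
    rw [List.filter_eq_self.mpr (fun y hy => by simp; rintro rfl; exact hx hy)]
    simp

theorem pv_filter_cwr2_cons {x : String} {xs : List String} (hx : x ∉ xs) (hxs : xs.Nodup) :
    (pv_cwr2 (x :: xs)).filter (fun p => decide ((x :: p).Nodup)) = pv_comb2 xs := by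
  show (((x :: xs).map (fun y => [x, y]) ++ pv_cwr2 xs).filter (fun p => decide ((x :: p).Nodup))) = pv_comb2 xs
  rw [List.filter_append]
  have h1 : ((x :: xs).map (fun y => [x, y])).filter (fun p => decide ((x :: p).Nodup)) = [] := by
    apply List.filter_eq_nil_iff.mpr
    intro p hp
    simp only [List.mem_map] at hp
    obtain ⟨y, _, rfl⟩ := hp
    simp
  rw [h1, List.nil_append]
  rw [List.filter_congr (fun p hp => ?_), pv_filter_cwr2 hxs]
  obtain ⟨a, b, rfl, ha, hb⟩ := pv_cwr2_shape hp
  have hxa : x ≠ a := fun e => hx (e ▸ ha)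
  have hxb : x ≠ b := fun e => hx (e ▸ hb)
  simp [List.nodup_cons, hxa, hxb]

theorem pv_filter_cwr3 {l : List String} (h : l.Nodup) :
    (pv_cwr3 l).filter (fun t => decide t.Nodup) = pv_comb3 l := by
  induction l with
  | nil => rfl
  | cons x xs ih =>
    have hx : x ∉ xs := (List.nodup_cons.mp h).1
    have hxs : xs.Nodup := (List.nodup_cons.mp h).2
    show (((pv_cwr2 (x :: xs)).map (fun p => x :: p) ++ pv_cwr3 xs).filter (fun t => decide t.Nodup)) = (pv_comb2 xs).map (fun p => x :: p) ++ pv_comb3 xs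
    rw [List.filter_append, ih hxs, List.filter_map]
    congr 1
    rw [show ((fun t => decide t.Nodup) ∘ fun p => x :: p) = (fun p => decide ((x :: p).Nodup)) from rfl]
    rw [pv_filter_cwr2_cons hx hxs]

theorem pv_cons_inj (x : String) : Function.Injective (fun y : String => [x, y]) := by
  intro a b h; simpa using h

theorem pv_cons_inj' (x : String) : Function.Injective (fun p : List String => x :: p) := by
  intro a b h; simpa using h

theorem pv_count_comb2 {l : List String} (h : l.Nodup) (c : List String) :
    (pv_comb2 l).count c = if c.Sublist l ∧ c.length = 2 then 1 else 0 := by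
  induction l with
  | nil =>
    rw [show pv_comb2 [] = [] from rfl, List.count_nil, if_neg]
    rintro ⟨hs, hl⟩
    rw [List.sublist_nil.mp hs] at hl
    simp at hl
  | cons x xs ih =>
    have hx : x ∉ xs := (List.nodup_cons.mp h).1
    have hxs : xs.Nodup := (List.nodup_cons.mp h).2
    rw [show pv_comb2 (x :: xs) = xs.map (fun y => [x, y]) ++ pv_comb2 xs from rfl,
      List.count_append, ih hxs]
    by_cases hc : ∃ b, c = [x, b]
    · obtain ⟨b, rfl⟩ := hc
      rw [List.count_map_of_injective xs (fun y => [x, y]) (pv_cons_inj x) b]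
      have h1 : ¬([x, b].Sublist xs ∧ [x, b].length = 2) :=
        fun ⟨hs, _⟩ => hx (hs.subset (by simp))
      by_cases hb : b ∈ xs
      · rw [List.count_eq_one_of_mem hxs hb, if_neg h1,
          if_pos ⟨List.cons_sublist_cons.mpr (List.singleton_sublist.mpr hb), rfl⟩]
      · rw [List.count_eq_zero.mpr hb, if_neg h1, if_neg
          (fun ⟨hs, _⟩ => hb (List.singleton_sublist.mp (List.cons_sublist_cons.mp hs)))]
    · rw [List.count_eq_zero.mpr (by
        intro hmem
        obtain ⟨y, -, hy⟩ := List.mem_map.mp hmem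
        exact hc ⟨y, hy.symm⟩), Nat.zero_add]
      congr 1
      apply propext
      constructor
      · rintro ⟨hs, hl⟩
        exact ⟨hs.trans (List.sublist_cons_self x xs), hl⟩
      · rintro ⟨hs, hl⟩
        rcases List.sublist_cons_iff.mp hs with h' | ⟨r, rfl, hr⟩
        · exact ⟨h', hl⟩
        · rcases r with _ | ⟨b, _ | ⟨z, t⟩⟩ <;> simp_all

theorem pv_count_comb3 {l : List String} (h : l.Nodup) (c : List String) :
    (pv_comb3 l).count c = if c.Sublist l ∧ c.length = 3 then 1 else 0 := by
  induction l with
  | nil =>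
    rw [show pv_comb3 [] = [] from rfl, List.count_nil, if_neg]
    rintro ⟨hs, hl⟩
    rw [List.sublist_nil.mp hs] at hl
    simp at hl
  | cons x xs ih =>
    have hx : x ∉ xs := (List.nodup_cons.mp h).1
    have hxs : xs.Nodup := (List.nodup_cons.mp h).2
    rw [show pv_comb3 (x :: xs) = (pv_comb2 xs).map (fun p => x :: p) ++ pv_comb3 xs from rfl,
      List.count_append, ih hxs]
    by_cases hc : ∃ r, c = x :: r
    · obtain ⟨r, rfl⟩ := hc
      rw [List.count_map_of_injective (pv_comb2 xs) (fun p => x :: p) (pv_cons_inj' x) r,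
        pv_count_comb2 hxs r]
      have h1 : ¬((x :: r).Sublist xs ∧ (x :: r).length = 3) :=
        fun ⟨hs, _⟩ => hx (hs.subset (by simp))
      by_cases hr : r.Sublist xs ∧ r.length = 2
      · rw [if_pos hr, if_neg h1,
          if_pos ⟨List.cons_sublist_cons.mpr hr.1, by simp [hr.2]⟩]
      · rw [if_neg hr, if_neg h1, if_neg
          (fun ⟨hs, hl⟩ => hr ⟨List.cons_sublist_cons.mp hs, by simp at hl; omega⟩)]
    · rw [List.count_eq_zero.mpr (by
        intro hmem
        obtain ⟨p, -, hp⟩ := List.mem_map.mp hmem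
        exact hc ⟨p, hp.symm⟩), Nat.zero_add]
      congr 1
      apply propext
      constructor
      · rintro ⟨hs, hl⟩
        exact ⟨hs.trans (List.sublist_cons_self x xs), hl⟩
      · rintro ⟨hs, hl⟩
        rcases List.sublist_cons_iff.mp hs with h' | ⟨r, rfl, hr⟩
        · exact ⟨h', hl⟩
        · exact absurd ⟨r, rfl⟩ hc

-- sublist of a filtered list, for c already a sublist of the base
theorem pv_sublist_filter_iff {c l : List String} (p : String → Bool) (h : c.Sublist l) :
    c.Sublist (l.filter p) ↔ ∀ x ∈ c, p x = true := by
  constructor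
  · intro hs x hx
    exact List.of_mem_filter (hs.subset hx)
  · intro hall
    have : c.filter p = c := List.filter_eq_self.mpr hall
    simpa [this] using List.Sublist.filter p h

theorem pv_foldl_count (q : List String → Bool) (txs : List (List String)) :
    ∀ n : Int, txs.foldl (fun count tx => if q tx then count + 1 else count) n
      = n + (txs.countP q : Int) := by
  induction txs with
  | nil => intro n; simp
  | cons tx txs ih =>
    intro n
    simp only [List.foldl_cons, List.countP_cons]
    by_cases hq : q tx = true <;> rw [ih] <;> simp [hq] <;> ring

theorem pv_coverage_eq (c : List String) (txs : List (List String)) :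
    pv_coverage c txs
      = ((txs.countP (fun tx => PySem.Set.issuperset (PySem.Set.ofList tx) c) : Nat) : Int) := by
  unfold pv_coverage
  simpa using pv_foldl_count (fun tx => PySem.Set.issuperset (PySem.Set.ofList tx) c) txs 0

theorem pv_sum_map_ite (q : List String → Bool) (txs : List (List String)) :
    (txs.map (fun tx => if q tx then 1 else 0)).sum = txs.countP q := by
  induction txs with
  | nil => rfl
  | cons tx txs ih =>
    simp only [List.map_cons, List.sum_cons, List.countP_cons, ih]
    by_cases hq : q tx = true <;> simp [hq] <;> omega

-- the count table agrees with A's coverage on every candidate of comb3 items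
theorem pv_counts_eq_coverage {items : List String} (hnd : items.Nodup)
    (txs : List (List String)) {c : List String} (hc : c ∈ pv_comb3 items) :
    (PySem.Dict.counter (txs.flatMap (fun tx =>
        pv_comb3 (items.filter (fun it => PySem.Set.contains (PySem.Set.ofList tx) it))))).getD c 0
      = pv_coverage c txs := by
  have hcs : c.Sublist items ∧ c.length = 3 := by
    have hpos : 0 < (pv_comb3 items).count c := List.count_pos_iff.mpr hc
    rw [pv_count_comb3 hnd c] at hpos
    by_cases h : c.Sublist items ∧ c.length = 3
    · exact h
    · rw [if_neg h] at hpos; omega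
  rw [PySem.Dict.getD_counter, pv_coverage_eq]
  congr 1
  rw [List.count_flatMap]
  have hpt : ∀ tx, (List.count c ∘ fun tx =>
      pv_comb3 (items.filter (fun it => PySem.Set.contains (PySem.Set.ofList tx) it))) tx
      = if PySem.Set.issuperset (PySem.Set.ofList tx) c then 1 else 0 := by
    intro tx
    show (pv_comb3 (items.filter (fun it => PySem.Set.contains (PySem.Set.ofList tx) it))).count c = _
    rw [pv_count_comb3 (hnd.filter _) c]
    congr 1
    apply propext
    constructor
    · rintro ⟨hs, -⟩
      rw [PySem.Set.issuperset_iff]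
      intro x hx
      have hm := List.of_mem_filter (hs.subset hx)
      exact (PySem.Set.contains_iff _ _).mp hm
    · intro hsup
      refine ⟨(pv_sublist_filter_iff _ hcs.1).mpr ?_, hcs.2⟩
      intro x hx
      exact (PySem.Set.contains_iff _ _).mpr ((PySem.Set.issuperset_iff _ _).mp hsup x hx)
  rw [List.map_congr_left (fun tx _ => hpt tx), pv_sum_map_ite]

theorem pv_foldl_filter (p : List String → Bool) (l : List (List String)) :
    ∀ acc, l.foldl (fun acc x => if p x then acc ++ [x] else acc) acc = acc ++ l.filter p := by
  induction l with
  | nil => intro acc; simp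
  | cons x xs ih =>
    intro acc
    simp only [List.foldl_cons, List.filter_cons]
    by_cases hp : p x = true <;> simp [hp, ih]

theorem pv_foldl_filterP (P : List String → Prop) [DecidablePred P] (l : List (List String)) :
    ∀ acc, l.foldl (fun acc x => if P x then acc ++ [x] else acc) acc
      = acc ++ l.filter (fun x => decide (P x)) := by
  induction l with
  | nil => intro acc; simp
  | cons x xs ih =>
    intro acc
    simp only [List.foldl_cons, List.filter_cons]
    by_cases hp : P x <;> simp [hp, ih]

-- ===== VERDICT (by name: the statement is the Claim_ definition above) =====
theorem three_item_sets_spec : Claim_equal_three_item_sets := by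
  intro two_sets txs min_coverage _
  unfold Spec_three_item_sets three_item_sets three_item_sets_alt pv_filter_item_sets_with_coverage
  simp only []
  have hnd := pv_get_items_nodup two_sets
  rw [pv_foldl_filter, pv_foldl_filterP (fun i => pv_coverage i txs ≥ min_coverage),
    List.nil_append, List.nil_append]
  have h1 : (pv_cwr3 (pv_get_items two_sets)).filter
      (fun tup => PySem.Set.len (PySem.Set.ofList tup) == 3) = pv_comb3 (pv_get_items two_sets) := by
    rw [List.filter_congr (fun t ht => ?_), pv_filter_cwr3 hnd]
    obtain ⟨a, b, c, rfl, -, -, -⟩ := pv_cwr3_shape ht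
    exact pv_setlen3 a b c
  rw [h1]
  apply List.filter_congr
  intro c hc
  rw [pv_counts_eq_coverage hnd txs hc]
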